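-- pv_equiv track=rewrite | github.com/bistrulli/generic-microservice-tester | tests/helpers/trace_validator.py | _validate_activity_calls
-- ===== SOURCE A (Python) =====
-- def _validate_activity_calls(trace: list[dict], activities: dict) -> tuple[bool, str]:
--     """Validate outbound calls for each activity match config.
--
--     Scans all call events following an activity (up to the next activity,
--     fork, join, or reply event) and checks against config.
--     """
--     stop_types = {"activity", "and_fork", "and_join", "or_fork", "reply", "phase_entry"}
--
--     for i, event in enumerate(trace):
--         if event["type"] != "activity":
--             continue
--
--         name = event["name"]
--         if name not in activities:
--             continue
--
--         act_config = activities[name]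
--         expected_sync = set(act_config.get("sync_calls", {}).keys())
--         expected_async = set(act_config.get("async_calls", {}).keys())
--
--         if not expected_sync and not expected_async:
--             continue
--
--         actual_sync = set()
--         actual_async = set()
--         for j in range(i + 1, len(trace)):
--             t = trace[j]["type"]
--             if t == "sync_call":
--                 actual_sync.add(trace[j]["target"])
--             elif t == "async_call":
--                 actual_async.add(trace[j]["target"])
--             elif t in stop_types:
--                 break
--
--         missing_sync = expected_sync - actual_sync
--         if missing_sync:
--             return False, f"Activity '{name}': missing sync_calls {missing_sync}"
--
--         missing_async = expected_async - actual_async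
--         if missing_async:
--             return False, f"Activity '{name}': missing async_calls {missing_async}"
--
--     return True, ""
-- ===== SOURCE B (Python) =====
-- def _validate_activity_calls(trace: list[dict], activities: dict) -> tuple[bool, str]:
--     """Two-phase rewrite: one forward pass collects per-activity segment
--     records (name, expected sets, and the call events observed until the
--     next boundary); a second pass checks each record in order, reading the
--     call targets only when its record is actually checked."""
--     stop_types = {"activity", "and_fork", "and_join", "or_fork", "reply", "phase_entry"}
--
--     records = []
--     current = None  # (name, expected_sync, expected_async, call_events)
--     for event in trace:
--         t = event["type"]
--         if t in stop_types:
--             if current is not None: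
--                 records.append(current)
--                 current = None
--             if t == "activity":
--                 name = event["name"]
--                 if name in activities:
--                     cfg = activities[name]
--                     expected_sync = set(cfg.get("sync_calls", {}).keys())
--                     expected_async = set(cfg.get("async_calls", {}).keys())
--                     if expected_sync or expected_async:
--                         current = (name, expected_sync, expected_async, [])
--         elif current is not None and t in ("sync_call", "async_call"):
--             current[3].append((t, event))
--     if current is not None:
--         records.append(current)
--
--     for name, expected_sync, expected_async, calls in records:
--         actual_sync = set()
--         actual_async = set()
--         for t, ev in calls:
--             if t == "sync_call":
--                 actual_sync.add(ev["target"])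
--             else:
--                 actual_async.add(ev["target"])
--         missing_sync = expected_sync - actual_sync
--         if missing_sync:
--             return False, f"Activity '{name}': missing sync_calls {missing_sync}"
--         missing_async = expected_async - actual_async
--         if missing_async:
--             return False, f"Activity '{name}': missing async_calls {missing_async}"
--     return True, ""
-- ===== Notes on version B (the rewrite author's own statement) =====
-- stated objective: alternative
-- what changed: Replaces A's indexed rescan (for each activity event, an inner loop re-scanning the following events up to the next boundary) by a two-phase decomposition: one forward pass over the trace builds an ordered list of per-activity segment records holding the expected sets and the segment's call events, then a separate pass checks each record's expected-minus-actual differences in order, reading call targets only when that record is checked.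
import Mathlib
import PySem

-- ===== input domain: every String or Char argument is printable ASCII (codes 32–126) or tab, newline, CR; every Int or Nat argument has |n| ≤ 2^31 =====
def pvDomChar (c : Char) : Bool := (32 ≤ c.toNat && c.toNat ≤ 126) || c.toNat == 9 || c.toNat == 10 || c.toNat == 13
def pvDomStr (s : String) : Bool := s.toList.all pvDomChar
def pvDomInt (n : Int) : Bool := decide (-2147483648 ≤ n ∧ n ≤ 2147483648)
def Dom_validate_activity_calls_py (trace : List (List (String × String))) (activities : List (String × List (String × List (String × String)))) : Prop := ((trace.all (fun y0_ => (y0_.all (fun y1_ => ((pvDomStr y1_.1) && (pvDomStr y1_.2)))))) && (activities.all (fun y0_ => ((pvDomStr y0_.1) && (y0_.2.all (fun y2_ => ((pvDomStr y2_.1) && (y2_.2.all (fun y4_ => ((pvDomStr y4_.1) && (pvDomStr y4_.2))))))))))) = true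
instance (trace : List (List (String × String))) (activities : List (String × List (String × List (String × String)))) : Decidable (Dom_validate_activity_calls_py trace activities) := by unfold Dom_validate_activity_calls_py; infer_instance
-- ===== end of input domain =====

-- B rebuilds A as a two-phase pass (collect per-activity segment records, then check them in order) — objective: alternative decomposition, same cost.

-- ----- helpers shared by both ports (both Python sources use the identical dict indexing, stop-type set and f-string) -----

-- event[k] style lookup on an event dict (first-match, per the assoc-list convention)
def pvGet (e : List (String × String)) (k d : String) : String := (PySem.Dict.mk e).getD k d

def pvStopTypes : PySem.Set String :=
  PySem.Set.ofList ["activity", "and_fork", "and_join", "or_fork", "reply", "phase_entry"]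

-- set(act_config.get(key, {}).keys())
def pvExp (cfg : List (String × List (String × String))) (key : String) : PySem.Set String :=
  PySem.Set.ofList (PySem.Dict.keys (PySem.Dict.mk ((PySem.Dict.mk cfg).getD key [])))

-- repr(s) for a Python str over the task's domain (printable ASCII plus tab/LF/CR): exact quote choice and escapes
def pvReprChars (cs : List Char) : List Char :=
  let q : Char := if cs.contains '\'' && !(cs.contains '"') then '"' else '\''
  q :: (cs.flatMap (fun c =>
    if c = '\\' then ['\\', '\\']
    else if c = q then ['\\', q]
    else if c = '\t' then ['\\', 't']
    else if c = '\n' then ['\\', 'n']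
    else if c = '\r' then ['\\', 'r']
    else [c])) ++ [q]

def pvRepr (s : String) : String := String.ofList (pvReprChars s.toList)

-- f"{missing}" where missing is a set of str: exact for sets of at most one element (guaranteed by Pre_);
-- Python's hash iteration order over a larger set is not modelled.
def pvSetStr (s : PySem.Set String) : String := "{" ++ PySem.Str.join ", " (s.map pvRepr) ++ "}"

def pvMsg (name kind : String) (miss : PySem.Set String) : String :=
  "Activity '" ++ name ++ "': missing " ++ kind ++ " " ++ pvSetStr miss

-- ===== PORT A =====

-- the inner `for j in range(i + 1, len(trace))` scan, as structural recursion over the suffix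
def pvScanA : List (List (String × String)) → PySem.Set String → PySem.Set String →
    PySem.Set String × PySem.Set String
  | [], accS, accA => (accS, accA)
  | e :: rest, accS, accA =>
    let t := pvGet e "type" ""
    if t = "sync_call" then pvScanA rest (PySem.Set.add accS (pvGet e "target" "")) accA
    else if t = "async_call" then pvScanA rest accS (PySem.Set.add accA (pvGet e "target" ""))
    else if pvStopTypes.contains t then (accS, accA)
    else pvScanA rest accS accA

def pvOuterA (activities : List (String × List (String × List (String × String)))) :
    List (List (String × String)) → Bool × String
  | [] => (true, "")
  | e :: rest =>
    if pvGet e "type" "" ≠ "activity" then pvOuterA activities rest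
    else
      let name := pvGet e "name" ""
      if (PySem.Dict.mk activities).contains name then
        let cfg := (PySem.Dict.mk activities).getD name []
        let expS := pvExp cfg "sync_calls"
        let expA := pvExp cfg "async_calls"
        if expS = [] ∧ expA = [] then pvOuterA activities rest
        else
          let sa := pvScanA rest [] []
          let missS := PySem.Set.diff expS sa.1
          if missS ≠ [] then (false, pvMsg name "sync_calls" missS)
          else
            let missA := PySem.Set.diff expA sa.2
            if missA ≠ [] then (false, pvMsg name "async_calls" missA)
            else pvOuterA activities rest
      else pvOuterA activities rest

def validate_activity_calls_py (trace : List (List (String × String))) (activities : List (String × List (String × List (String × String)))) : Bool × String :=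
  pvOuterA activities trace

-- ===== PORT B =====

-- phase 1: one forward pass collecting segment records
-- (name, expected_sync, expected_async, call events of the segment; targets are read later)
def pvCollectB (activities : List (String × List (String × List (String × String)))) :
    List (List (String × String)) →
    Option (String × PySem.Set String × PySem.Set String × List (String × List (String × String))) →
    List (String × PySem.Set String × PySem.Set String × List (String × List (String × String)))
  | [], cur => match cur with | none => [] | some r => [r]
  | e :: rest, cur =>
    let t := pvGet e "type" ""
    if pvStopTypes.contains t then
      let flushed := match cur with | none => [] | some r => [r]
      let newcur :=
        if t = "activity" then
          let name := pvGet e "name" ""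
          if (PySem.Dict.mk activities).contains name then
            let cfg := (PySem.Dict.mk activities).getD name []
            let expS := pvExp cfg "sync_calls"
            let expA := pvExp cfg "async_calls"
            if expS = [] ∧ expA = [] then none
            else some (name, expS, expA, ([] : List (String × List (String × String))))
          else none
        else none
      flushed ++ pvCollectB activities rest newcur
    else
      match cur with
      | none => pvCollectB activities rest none
      | some (n, es, ea, cs) =>
        if t = "sync_call" ∨ t = "async_call" then
          pvCollectB activities rest (some (n, es, ea, cs ++ [(t, e)]))
        else pvCollectB activities rest (some (n, es, ea, cs))

-- `for t, ev in calls:` — build the record's actual sets, reading targets only now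
def pvActualsB : List (String × List (String × String)) → PySem.Set String → PySem.Set String →
    PySem.Set String × PySem.Set String
  | [], s, a => (s, a)
  | (t, e) :: rest, s, a =>
    if t = "sync_call" then pvActualsB rest (PySem.Set.add s (pvGet e "target" "")) a
    else pvActualsB rest s (PySem.Set.add a (pvGet e "target" ""))

-- phase 2: check the records in order, first failure wins
def pvCheckB : List (String × PySem.Set String × PySem.Set String × List (String × List (String × String))) → Bool × String
  | [] => (true, "")
  | (n, es, ea, cs) :: rs =>
    let sa := pvActualsB cs [] []
    let missS := PySem.Set.diff es sa.1
    if missS ≠ [] then (false, pvMsg n "sync_calls" missS)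
    else
      let missA := PySem.Set.diff ea sa.2
      if missA ≠ [] then (false, pvMsg n "async_calls" missA)
      else pvCheckB rs

def validate_activity_calls_py_alt (trace : List (List (String × String))) (activities : List (String × List (String × List (String × String)))) : Bool × String :=
  pvCheckB (pvCollectB activities trace none)

-- ===== PRECONDITION & SPEC =====

-- event i of the trace (as a dict), its type, and key-presence
def pvEvt (trace : List (List (String × String))) (i : Nat) : List (String × String) := trace.getD i []
def pvTy (trace : List (List (String × String))) (i : Nat) : String := pvGet (pvEvt trace i) "type" ""
def pvHasKey (e : List (String × String)) (k : String) : Bool := (PySem.Dict.mk e).contains k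
def pvIsCall (t : String) : Bool := t == "sync_call" || t == "async_call"

-- j lies in the scan started after event i (no boundary event strictly between them)
def pvInScan (trace : List (List (String × String))) (i j : Nat) : Bool :=
  decide (i < j) && decide (j < trace.length) &&
  ((List.range j).all fun m => !(decide (i < m)) || !(pvStopTypes.contains (pvTy trace m)))

-- an activity event that starts a tracked segment: named in `activities` with a nonempty expectation
def pvTracked (activities : List (String × List (String × List (String × String)))) (e : List (String × String)) : Bool :=
  (pvGet e "type" "" == "activity") &&
  (PySem.Dict.mk activities).contains (pvGet e "name" "") &&
  !(decide (pvExp ((PySem.Dict.mk activities).getD (pvGet e "name" "") []) "sync_calls" = []) &&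
    decide (pvExp ((PySem.Dict.mk activities).getD (pvGet e "name" "") []) "async_calls" = []))

-- the expected calls of kind `key` at activity i that no matching call in its segment satisfies
def pvMissing (trace : List (List (String × String))) (activities : List (String × List (String × List (String × String)))) (i : Nat) (key callty : String) : List String :=
  (pvExp ((PySem.Dict.mk activities).getD (pvGet (pvEvt trace i) "name" "") []) key).filter (fun x =>
    !((List.range trace.length).any (fun j =>
        pvInScan trace i j && (pvTy trace j == callty) && (pvGet (pvEvt trace j) "target" "" == x))))

-- A's check at event i makes it return (False, _)
def pvFailAt (trace : List (List (String × String))) (activities : List (String × List (String × List (String × String)))) (i : Nat) : Bool :=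
  pvTracked activities (pvEvt trace i) &&
  (!(pvMissing trace activities i "sync_calls" "sync_call").isEmpty ||
   !(pvMissing trace activities i "async_calls" "async_call").isEmpty)

-- no event before i makes A return, so A's outer loop reaches event i (and, if tracked, scans its segment)
def pvReached (trace : List (List (String × String))) (activities : List (String × List (String × List (String × String)))) (i : Nat) : Bool :=
  (List.range i).all fun i' => !(pvFailAt trace activities i')

-- for a tracked activity, every call event of its segment (which A's inner scan reads) has its 'target' key
def pvSegTargetsOk (trace : List (List (String × String))) (activities : List (String × List (String × List (String × String)))) (i : Nat) : Bool :=
  !(pvTracked activities (pvEvt trace i)) ||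
    ((List.range trace.length).all fun j => !(pvInScan trace i j) ||
      (!(pvIsCall (pvTy trace j)) || pvHasKey (pvEvt trace j) "target"))

-- the failure message at i renders a set of at most one element
def pvRenderableAt (trace : List (List (String × String))) (activities : List (String × List (String × List (String × String)))) (i : Nat) : Bool :=
  let mS := pvMissing trace activities i "sync_calls" "sync_call"
  let mA := pvMissing trace activities i "async_calls" "async_call"
  decide (mS.length ≤ 1) && (!(mS.isEmpty) || decide (mA.length ≤ 1))

-- Pre_ excludes exactly (a) the inputs on which A raises KeyError (an event without 'type', an activity event
-- without 'name', or a call event without 'target' in the segment of a tracked activity that A's scan reaches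
-- before its first failure return) — on the post-return malformed type/name events B itself raises — and (b) the
-- inputs whose failure message would render a set of two or more strings, whose element order depends on CPython's
-- randomized string hashing, so the string A returns there is not a deterministic function of the input.
def Pre_validate_activity_calls_py (trace : List (List (String × String))) (activities : List (String × List (String × List (String × String)))) : Prop :=
  ((List.range trace.length).all fun i =>
    pvHasKey (pvEvt trace i) "type" &&
    (!(pvTy trace i == "activity") || pvHasKey (pvEvt trace i) "name") &&
    (!(pvReached trace activities i) ||
      (pvSegTargetsOk trace activities i &&
       (!(pvFailAt trace activities i) || pvRenderableAt trace activities i)))) = true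
instance (trace : List (List (String × String))) (activities : List (String × List (String × List (String × String)))) : Decidable (Pre_validate_activity_calls_py trace activities) := by unfold Pre_validate_activity_calls_py; infer_instance

def pvWitness_validate_activity_calls_py : (List (List (String × String))) × (List (String × List (String × List (String × String)))) :=
  ([[("type", "activity"), ("name", "a")], [("type", "sync_call"), ("target", "x")]],
   [("a", [("sync_calls", [("x", "s1")]), ("async_calls", [("y", "s2")])])])

def Spec_validate_activity_calls_py (trace : List (List (String × String))) (activities : List (String × List (String × List (String × String)))) (out : Bool × String) : Prop := out = validate_activity_calls_py_alt trace activities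
instance (trace : List (List (String × String))) (activities : List (String × List (String × List (String × String)))) (out : Bool × String) : Decidable (Spec_validate_activity_calls_py trace activities out) := by unfold Spec_validate_activity_calls_py; infer_instance

-- ===== CLAIM (what is proved, stated in full; the proofs are below) =====
def Claim_equal_validate_activity_calls_py : Prop := ∀ (trace : List (List (String × String))) (activities : List (String × List (String × List (String × String)))), Dom_validate_activity_calls_py trace activities → Pre_validate_activity_calls_py trace activities → Spec_validate_activity_calls_py trace activities (validate_activity_calls_py trace activities)

-- ===== LEMMAS AND PROOFS =====

-- what pvCheckB does with one record in front of the queue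
def pvAfter (n : String) (es ea : PySem.Set String) (sa : PySem.Set String × PySem.Set String)
    (k : Bool × String) : Bool × String :=
  let missS := PySem.Set.diff es sa.1
  if missS ≠ [] then (false, pvMsg n "sync_calls" missS)
  else
    let missA := PySem.Set.diff ea sa.2
    if missA ≠ [] then (false, pvMsg n "async_calls" missA)
    else k

theorem pvCheckB_cons (n : String) (es ea : PySem.Set String) (cs : List (String × List (String × String)))
    (rs : List (String × PySem.Set String × PySem.Set String × List (String × List (String × String)))) :
    pvCheckB ((n, es, ea, cs) :: rs) = pvAfter n es ea (pvActualsB cs [] []) (pvCheckB rs) := rfl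

theorem pvActualsB_append (cs ds : List (String × List (String × String))) (s a : PySem.Set String) :
    pvActualsB (cs ++ ds) s a = pvActualsB ds (pvActualsB cs s a).1 (pvActualsB cs s a).2 := by
  induction cs generalizing s a with
  | nil => simp [pvActualsB]
  | cons p rest ih =>
    obtain ⟨t, e⟩ := p
    by_cases h : t = "sync_call" <;> simp [pvActualsB, h, ih]

theorem pvStop_cases (t : String) (h : t ∈ pvStopTypes) :
    t = "activity" ∨ t = "and_fork" ∨ t = "and_join" ∨ t = "or_fork" ∨ t = "reply" ∨ t = "phase_entry" := by
  simpa [pvStopTypes, PySem.Set.ofList] using h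

theorem pvMain (activities : List (String × List (String × List (String × String)))) :
    ∀ (rest : List (List (String × String)))
      (cur : Option (String × PySem.Set String × PySem.Set String × List (String × List (String × String)))),
      pvCheckB (pvCollectB activities rest cur) =
        match cur with
        | none => pvOuterA activities rest
        | some (n, es, ea, cs) =>
            pvAfter n es ea
              (pvScanA rest (pvActualsB cs [] []).1 (pvActualsB cs [] []).2)
              (pvOuterA activities rest) := by
  intro rest
  induction rest with
  | nil =>
    intro cur
    cases cur with
    | none => simp [pvCollectB, pvCheckB, pvOuterA]
    | some r =>
      obtain ⟨n, es, ea, cs⟩ := r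
      simp [pvCollectB, pvCheckB_cons, pvCheckB, pvOuterA, pvScanA]
  | cons e rest ih =>
    intro cur
    by_cases hstop : pvGet e "type" "" ∈ pvStopTypes
    · -- boundary event: flush, maybe start a new record
      have hnone : pvCheckB (pvCollectB activities (e :: rest) none) = pvOuterA activities (e :: rest) := by
        have hA : "activity" ∈ pvStopTypes := by decide
        by_cases hact : pvGet e "type" "" = "activity"
        · by_cases hmem : (PySem.Dict.mk activities).contains (pvGet e "name" "") = true
          · by_cases hemp : pvExp ((PySem.Dict.mk activities).getD (pvGet e "name" "") []) "sync_calls" = [] ∧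
                pvExp ((PySem.Dict.mk activities).getD (pvGet e "name" "") []) "async_calls" = []
            · simp [pvCollectB, hA, hact, hmem, hemp, pvOuterA, ih none]
            · simp [pvCollectB, hA, hact, hmem, hemp, pvOuterA,
                ih (some (pvGet e "name" "",
                  pvExp ((PySem.Dict.mk activities).getD (pvGet e "name" "") []) "sync_calls",
                  pvExp ((PySem.Dict.mk activities).getD (pvGet e "name" "") []) "async_calls", [])),
                pvActualsB, pvAfter]
          · simp [pvCollectB, hA, hact, hmem, pvOuterA, ih none]
        · simp [pvCollectB, hstop, hact, pvOuterA, ih none]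
      cases cur with
      | none => exact hnone
      | some r =>
        obtain ⟨n, es, ea, cs⟩ := r
        -- a stop type is never a call type, so the A-side scan stops here
        have hns : pvGet e "type" "" ≠ "sync_call" := by
          rcases pvStop_cases _ hstop with h | h | h | h | h | h <;> simp [h]
        have hna : pvGet e "type" "" ≠ "async_call" := by
          rcases pvStop_cases _ hstop with h | h | h | h | h | h <;> simp [h]
        have hcol : pvCollectB activities (e :: rest) (some (n, es, ea, cs)) =
            (n, es, ea, cs) :: pvCollectB activities (e :: rest) none := by
          simp [pvCollectB, hstop]
        rw [hcol, pvCheckB_cons, hnone]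
        simp [pvScanA, hns, hna, hstop]
    · -- plain event: A's outer loop skips it, B keeps (or not) collecting
      have hact : pvGet e "type" "" ≠ "activity" := by
        intro h; exact hstop (by rw [h]; decide)
      have hout : pvOuterA activities (e :: rest) = pvOuterA activities rest := by
        simp [pvOuterA, hact]
      cases cur with
      | none => simpa [pvCollectB, hstop, hout] using ih none
      | some r =>
        obtain ⟨n, es, ea, cs⟩ := r
        by_cases hsy : pvGet e "type" "" = "sync_call"
        · have := ih (some (n, es, ea, cs ++ [(pvGet e "type" "", e)]))
          simpa [pvCollectB, hstop, hsy, hout, pvScanA, pvActualsB_append, pvActualsB] using this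
        · by_cases hay : pvGet e "type" "" = "async_call"
          · have := ih (some (n, es, ea, cs ++ [(pvGet e "type" "", e)]))
            simpa [pvCollectB, hstop, hsy, hay, hout, pvScanA, pvActualsB_append, pvActualsB] using this
          · simpa [pvCollectB, hstop, hsy, hay, hout, pvScanA] using ih (some (n, es, ea, cs))

-- ===== VERDICT (by name: the statement is the Claim_ definition above) =====
theorem validate_activity_calls_py_spec : Claim_equal_validate_activity_calls_py := by
  intro trace activities _ _
  unfold Spec_validate_activity_calls_py validate_activity_calls_py validate_activity_calls_py_alt
  exact (pvMain activities trace none).symm
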